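-- pv_equiv track=rewrite | github.com/kuzwolka/study-lang | 프로그래머스/2/138476. 귤 고르기/귤 고르기.py | solution
-- ===== SOURCE A (Python) =====
-- def solution(k, tangerine):
--     tangdic = dict.fromkeys(tangerine,0)
--     for x in tangerine:
--         tangdic[x] += 1
--     num = sorted(tangdic.values())
--
--     answer = 0
--     while(k > 0):
--         k -= num.pop()
--         answer += 1
--     return answer
-- ===== SOURCE B (Python) =====
-- def solution(k, tangerine):
--     freq = {}
--     for x in tangerine:
--         freq[x] = freq.get(x, 0) + 1
--     hist = {}
--     maxf = 0
--     for f in freq.values():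
--         hist[f] = hist.get(f, 0) + 1
--         if f > maxf:
--             maxf = f
--     answer = 0
--     f = maxf
--     while k > 0 and f > 0:
--         c = hist.get(f, 0)
--         while c > 0 and k > 0:
--             k -= f
--             answer += 1
--             c -= 1
--         f -= 1
--     return answer
-- ===== Notes on version B (the rewrite author's own statement) =====
-- stated objective: alternative
-- what changed: Replaces A's sort-then-pop greedy over the frequency values by a counting walk over a frequency-of-frequencies histogram, taking sizes from the largest frequency downward without any sort.
import Mathlib
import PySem

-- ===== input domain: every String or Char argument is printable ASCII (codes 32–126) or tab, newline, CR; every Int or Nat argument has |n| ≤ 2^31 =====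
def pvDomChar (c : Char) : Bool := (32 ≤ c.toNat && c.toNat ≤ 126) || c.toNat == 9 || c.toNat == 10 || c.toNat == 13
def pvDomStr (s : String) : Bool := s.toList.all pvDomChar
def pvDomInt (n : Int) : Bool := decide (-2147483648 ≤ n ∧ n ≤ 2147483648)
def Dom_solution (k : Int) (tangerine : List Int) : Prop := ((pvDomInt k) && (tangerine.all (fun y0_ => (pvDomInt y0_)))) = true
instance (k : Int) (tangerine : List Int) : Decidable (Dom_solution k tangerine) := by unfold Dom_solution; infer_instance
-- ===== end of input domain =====

-- B replaces A's sort-then-pop greedy by a counting walk over a frequency-of-frequencies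
-- histogram, from the largest frequency downward (objective: a genuinely different algorithm).

-- ===== PORT A =====
-- A's while loop: pop the last element of num while k > 0.  The Nat fuel only makes the
-- recursion structural; started with num.length + 1 it never runs out before the loop ends.
-- Where Python's num.pop() would raise IndexError (num empty, k still positive) this
-- returns the current answer; those inputs are excluded by Pre_solution.
def popLoopA : Nat → Int → List Int → Int → Int
  | 0, _, _, answer => answer
  | fuel + 1, k, num, answer =>
    if k > 0 then
      match PySem.List.pop? num with
      | none => answer
      | some (x, rest) => popLoopA fuel (k - x) rest (answer + 1)
    else answer

def solution (k : Int) (tangerine : List Int) : Int :=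
  -- tangdic = dict.fromkeys(tangerine, 0)
  let tangdic : PySem.Dict Int Int := tangerine.foldl (fun d x => d.insert x 0) PySem.Dict.empty
  -- for x in tangerine: tangdic[x] += 1   (x is always a key of tangdic here, so it is modify)
  let tangdic := tangerine.foldl (fun d x => d.modify x 0 (· + 1)) tangdic
  -- num = sorted(tangdic.values())
  let num := PySem.List.sorted tangdic.values (fun v => v)
  popLoopA (num.length + 1) k num 0

-- ===== PORT B =====
-- inner while of Source B: while c > 0 and k > 0: k -= f; answer += 1; c -= 1  — returns (k, answer).
-- The Nat fuel (started at c.toNat) only makes the recursion structural: c decreases by 1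
-- each iteration, so the loop condition fails no later than the fuel runs out.
def innerB : Nat → Int → Int → Int → Int → Int × Int
  | 0, _, _, k, answer => (k, answer)
  | fuel + 1, f, c, k, answer =>
    if c > 0 ∧ k > 0 then innerB fuel f (c - 1) (k - f) (answer + 1) else (k, answer)

-- outer while of Source B: while k > 0 and f > 0 (fuel started at f.toNat; f decreases by 1)
def outerB : Nat → PySem.Dict Int Int → Int → Int → Int → Int
  | 0, _, _, _, answer => answer
  | fuel + 1, hist, f, k, answer =>
    if k > 0 ∧ f > 0 then
      let c := hist.getD f 0
      let r := innerB c.toNat f c k answer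
      outerB fuel hist (f - 1) r.1 r.2
    else answer

def solution_alt (k : Int) (tangerine : List Int) : Int :=
  -- freq[x] = freq.get(x, 0) + 1
  let freq : PySem.Dict Int Int := tangerine.foldl (fun d x => d.insert x (d.getD x 0 + 1)) PySem.Dict.empty
  -- one pass over freq.values() building hist and maxf together
  let hm := freq.values.foldl
    (fun (p : PySem.Dict Int Int × Int) f => (p.1.insert f (p.1.getD f 0 + 1), if f > p.2 then f else p.2))
    (PySem.Dict.empty, 0)
  outerB hm.2.toNat hm.1 hm.2 k 0

-- ===== PRECONDITION & SPEC =====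
-- Pre_ excludes exactly the inputs where A raises IndexError: k exceeds the total number
-- of tangerines, so A's pop loop exhausts the list while k is still positive.
def Pre_solution (k : Int) (tangerine : List Int) : Prop := k ≤ (tangerine.length : Int)
instance (k : Int) (tangerine : List Int) : Decidable (Pre_solution k tangerine) := by unfold Pre_solution; infer_instance
def pvWitness_solution : Int × List Int := (2, [1, 1, 3])

def Spec_solution (k : Int) (tangerine : List Int) (out : Int) : Prop := out = solution_alt k tangerine
instance (k : Int) (tangerine : List Int) (out : Int) : Decidable (Spec_solution k tangerine out) := by unfold Spec_solution; infer_instance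

-- ===== CLAIM (what is proved, stated in full; the proofs are below) =====
def Claim_equal_solution : Prop := ∀ (k : Int) (tangerine : List Int), Dom_solution k tangerine → Pre_solution k tangerine → Spec_solution k tangerine (solution k tangerine)

-- ===== LEMMAS AND PROOFS =====

-- the common greedy: consume the list front to back while k > 0
def frontLoop (k : Int) (l : List Int) (answer : Int) : Int :=
  match l with
  | [] => answer
  | x :: r => if k > 0 then frontLoop (k - x) r (answer + 1) else answer

theorem frontLoop_nonpos (k : Int) (l : List Int) (a : Int) (h : ¬ k > 0) :
    frontLoop k l a = a := by
  cases l <;> simp [frontLoop, h]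

theorem popLoopA_eq_frontLoop_reverse (l : List Int) :
    ∀ k a, popLoopA (l.length + 1) k l a = frontLoop k l.reverse a := by
  induction l using List.reverseRecOn with
  | nil =>
      intro k a
      by_cases h : k > 0 <;> simp [popLoopA, frontLoop, PySem.List.pop?, PySem.List.pyIdx?, h]
  | append_singleton init x ih =>
      intro k a
      by_cases h : k > 0
      · simp only [List.length_append, List.length_singleton, popLoopA, h, reduceIte,
          PySem.List.pop?_last, List.reverse_append, List.reverse_singleton,
          List.singleton_append, frontLoop]
        rw [← ih (k - x) (a + 1)]
        simp only [popLoopA]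
      · simp only [popLoopA, h, reduceIte, List.reverse_append, List.reverse_singleton,
          List.singleton_append, frontLoop]

-- the descending block sequence that B's histogram walk consumes
def descSeq (vals : List Int) : Nat → List Int
  | 0 => []
  | n + 1 => List.replicate (vals.count ((n : Int) + 1)) ((n : Int) + 1) ++ descSeq vals n

theorem mem_descSeq (vals : List Int) : ∀ n x, x ∈ descSeq vals n → 0 < x ∧ x ≤ (n : Int) := by
  intro n
  induction n with
  | zero => simp [descSeq]
  | succ m ih =>
      intro x hx
      simp only [descSeq, List.mem_append, List.mem_replicate] at hx
      rcases hx with ⟨-, rfl⟩ | hx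
      · omega
      · have := ih x hx
        omega

theorem count_descSeq (vals : List Int) :
    ∀ n g, (descSeq vals n).count g = if 0 < g ∧ g ≤ (n : Int) then vals.count g else 0 := by
  intro n
  induction n with
  | zero => intro g; simp [descSeq]
  | succ m ih =>
      intro g
      simp only [descSeq, List.count_append, ih, List.count_replicate]
      by_cases hg : ((m : Int) + 1) = g
      · subst hg
        simp only [beq_self_eq_true, if_true]
        push_cast
        split_ifs <;> omega
      · simp only [beq_iff_eq, hg, if_false]
        rw [zero_add]
        push_cast
        split_ifs <;> omega

theorem descSeq_pairwise_ge (vals : List Int) :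
    ∀ n, (descSeq vals n).Pairwise (fun a b => b ≤ a) := by
  intro n
  induction n with
  | zero => simp [descSeq]
  | succ m ih =>
      rw [descSeq, List.pairwise_append]
      refine ⟨?_, ih, ?_⟩
      · rw [List.pairwise_replicate]; right; exact le_rfl
      · intro x hx y hy
        have hx' := (List.mem_replicate.mp hx).2
        have hy' := (mem_descSeq vals m y hy).2
        omega

-- innerB consumes one replicate block of frontLoop's list
theorem innerB_frontLoop (f : Int) :
    ∀ (c : Nat) (k a : Int) (rest : List Int),
      frontLoop k (List.replicate c f ++ rest) a
        = frontLoop (innerB c f (c : Int) k a).1 rest (innerB c f (c : Int) k a).2 := by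
  intro c
  induction c with
  | zero => intro k a rest; simp [innerB]
  | succ m ih =>
      intro k a rest
      by_cases hk : k > 0
      · have step : innerB (m + 1) f ((m + 1 : Nat) : Int) k a
            = innerB m f (m : Int) (k - f) (a + 1) := by
          simp only [innerB]
          rw [if_pos ⟨by push_cast; omega, hk⟩]
          have h1 : ((m + 1 : Nat) : Int) - 1 = (m : Int) := by push_cast; ring
          rw [h1]
        rw [step, List.replicate_succ, List.cons_append]
        simp only [frontLoop]
        rw [if_pos hk]
        exact ih (k - f) (a + 1) rest
      · have step : innerB (m + 1) f ((m + 1 : Nat) : Int) k a = (k, a) := by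
          simp only [innerB]
          rw [if_neg (fun h => hk h.2)]
        rw [step, List.replicate_succ, List.cons_append]
        simp only [frontLoop]
        rw [if_neg hk, frontLoop_nonpos _ rest _ hk]

-- outerB's walk from n downward consumes exactly descSeq vals n
theorem outerB_frontLoop (vals : List Int) :
    ∀ (n : Nat) (k a : Int),
      outerB n (PySem.Dict.counter vals) (n : Int) k a = frontLoop k (descSeq vals n) a := by
  intro n
  induction n with
  | zero => intro k a; simp [outerB, descSeq, frontLoop]
  | succ m ih =>
      intro k a
      by_cases hk : k > 0
      · simp only [outerB]
        rw [if_pos ⟨hk, by push_cast; omega⟩]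
        have hc : (PySem.Dict.counter vals).getD ((m + 1 : Nat) : Int) 0
            = ((vals.count ((m : Int) + 1) : Nat) : Int) := by
          rw [PySem.Dict.getD_counter]
          push_cast
          ring_nf
        have hmm : ((m + 1 : Nat) : Int) - 1 = (m : Int) := by push_cast; ring
        rw [descSeq, innerB_frontLoop]
        rw [hc, hmm]
        simp only [Int.toNat_natCast, ih]
        push_cast
        rfl
      · simp only [outerB]
        rw [if_neg (fun h => hk h.1), descSeq, frontLoop_nonpos _ _ _ hk]

-- the fromkeys pass stores 0 at every key
theorem getD_foldl_insert_zero (xs : List Int) :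
    ∀ (d : PySem.Dict Int Int), (∀ w, d.getD w 0 = 0) →
      ∀ v, (xs.foldl (fun d x => d.insert x (0 : Int)) d).getD v 0 = 0 := by
  induction xs with
  | nil => intro d hd v; exact hd v
  | cons x t ih =>
      intro d hd v
      simp only [List.foldl_cons]
      refine ih (d.insert x 0) (fun w => ?_) v
      rw [PySem.Dict.getD_insert]
      split_ifs <;> [rfl; exact hd w]

-- Source B's single pass building hist and maxf splits into two independent foldls
theorem hist_max_split (vals : List Int) :
    ∀ (d : PySem.Dict Int Int) (m : Int),
      vals.foldl
          (fun (p : PySem.Dict Int Int × Int) f => (p.1.insert f (p.1.getD f 0 + 1), if f > p.2 then f else p.2))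
          (d, m)
        = (vals.foldl (fun d f => d.insert f (d.getD f 0 + 1)) d,
           vals.foldl (fun m f => if f > m then f else m) m) := by
  induction vals with
  | nil => intros; rfl
  | cons x t ih => intro d m; simp only [List.foldl_cons]; exact ih _ _

theorem if_gt_eq_max (m f : Int) : (if f > m then f else m) = max m f := by
  rw [max_def]; split_ifs <;> omega

-- A's two counting passes build exactly Counter(tangerine)
theorem dictA_eq_counter (tangerine : List Int) :
    tangerine.foldl (fun d x => d.modify x 0 (· + 1))
        (tangerine.foldl (fun (d : PySem.Dict Int Int) x => d.insert x 0) PySem.Dict.empty)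
      = PySem.Dict.counter tangerine := by
  set d1 := tangerine.foldl (fun (d : PySem.Dict Int Int) x => d.insert x 0) PySem.Dict.empty with hd1
  set d2 := tangerine.foldl (fun d x => d.modify x 0 (· + 1)) d1 with hd2
  have hk1 : d1.keys = PySem.Set.ofList tangerine := by
    rw [hd1, PySem.Dict.keys_foldl_insert tangerine (fun _ _ => 0) PySem.Dict.empty]
    simp [PySem.Set.update_nil_left]
  have hk2 : d2.keys = PySem.Set.ofList tangerine := by
    rw [hd2, PySem.Dict.keys_foldl_modify tangerine 0 (fun _ _ => (· + 1)) d1, hk1,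
      PySem.Set.update_eq_append_filter]
    have hcont : ∀ y ∈ PySem.Set.ofList tangerine, (PySem.Set.ofList tangerine).contains y = true := by
      intro y hy; exact (PySem.Set.contains_iff _ _).mpr hy
    rw [List.filter_eq_nil_iff.mpr (by intro y hy; rw [hcont y hy]; simp), List.append_nil]
  have hget1 : ∀ v, d1.getD v 0 = 0 := by
    rw [hd1]
    exact getD_foldl_insert_zero tangerine PySem.Dict.empty (fun w => PySem.Dict.getD_empty w 0)
  have hget2 : ∀ v, d2.getD v 0 = ((tangerine.count v : Nat) : Int) := by
    intro v
    rw [hd2, PySem.Dict.getD_foldl_modify_add_one, hget1, zero_add]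
  have hnd : d2.keys.Nodup := by rw [hk2]; exact PySem.Set.nodup_ofList tangerine
  apply PySem.Dict.ext
  rw [PySem.Dict.items_eq_map_keys d2 hnd 0,
    PySem.Dict.items_eq_map_keys (PySem.Dict.counter tangerine) (PySem.Dict.nodup_keys_counter tangerine) 0,
    hk2, PySem.Dict.keys_counter]
  apply List.map_congr_left
  intro v hv
  rw [hget2, PySem.Dict.getD_counter]

theorem counter_values_pos (xs : List Int) :
    ∀ v ∈ (PySem.Dict.counter xs).values, 0 < v := by
  intro v hv
  rw [PySem.Dict.values_eq_map_keys _ (PySem.Dict.nodup_keys_counter xs) 0] at hv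
  simp only [List.mem_map] at hv
  obtain ⟨x, hx, rfl⟩ := hv
  rw [PySem.Dict.keys_counter] at hx
  have hmem : x ∈ xs := (PySem.Set.mem_ofList _ _).mp hx
  rw [PySem.Dict.getD_counter]
  exact_mod_cast List.count_pos_iff.mpr hmem

-- the main algorithmic fact: the sorted values, popped from the back, are exactly descSeq
theorem sorted_reverse_eq_descSeq (vals : List Int)
    (hpos : ∀ v ∈ vals, 0 < v) (m : Nat) (hle : ∀ v ∈ vals, v ≤ (m : Int)) :
    (PySem.List.sorted vals (fun v => v)).reverse = descSeq vals m := by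
  have hperm : (descSeq vals m).reverse.Perm vals := by
    refine (List.reverse_perm _).trans (List.perm_iff_count.mpr ?_)
    intro g
    rw [count_descSeq]
    split_ifs with h
    · rfl
    · rcases not_and_or.mp h with h1 | h2
      · exact (List.count_eq_zero.mpr (fun hg => h1 (hpos g hg))).symm
      · exact (List.count_eq_zero.mpr (fun hg => h2 (hle g hg))).symm
  have hsorted : ((descSeq vals m).reverse).Pairwise (fun a b => a ≤ b) := by
    rw [List.pairwise_reverse]
    exact descSeq_pairwise_ge vals m
  have := PySem.List.sorted_id_eq_of_perm_of_pairwise vals (descSeq vals m).reverse hperm hsorted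
  rw [this, List.reverse_reverse]

theorem solution_eq_alt (k : Int) (tangerine : List Int) :
    solution k tangerine = solution_alt k tangerine := by
  rw [solution, solution_alt]
  simp only [dictA_eq_counter, PySem.Dict.foldl_insert_getD_add_one_eq_counter]
  set vals := (PySem.Dict.counter tangerine).values with hvals
  rw [hist_max_split]
  simp only [PySem.Dict.foldl_insert_getD_add_one_eq_counter]
  have hmax : vals.foldl (fun m f => if f > m then f else m) 0 = vals.foldl max 0 := by
    congr 1
    funext m f
    exact if_gt_eq_max m f
  simp only [hmax]
  set M := vals.foldl max 0 with hM
  have hM0 : 0 ≤ M := (PySem.List.le_foldl_max vals 0).1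
  have hMub : ∀ v ∈ vals, v ≤ M := (PySem.List.le_foldl_max vals 0).2
  have hMn : M = ((M.toNat : Nat) : Int) := (Int.toNat_of_nonneg hM0).symm
  rw [popLoopA_eq_frontLoop_reverse]
  rw [sorted_reverse_eq_descSeq vals (counter_values_pos tangerine) M.toNat
    (by intro v hv; rw [← hMn]; exact hMub v hv)]
  conv_rhs => rw [hMn]
  rw [Int.toNat_natCast, outerB_frontLoop vals M.toNat k 0]

-- ===== VERDICT (by name: the statement is the Claim_ definition above) =====
theorem solution_spec : Claim_equal_solution := by
  intro k tangerine _ _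
  unfold Spec_solution
  exact solution_eq_alt k tangerine
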